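-- pv_equiv track=rewrite | github.com/bssrdf/pyleet | MaximizeNumberofSubsequencesinaString.py | maximumSubsequenceCount2
-- ===== SOURCE A (Python) =====
-- def maximumSubsequenceCount2(text: str, pattern: str) -> int:
--     t1, t2 = pattern
--     def count(s):
--         c2 = [0]*(len(s)+1)
--         cnt = 0
--         for i in range(len(s)-1,-1, -1):
--             if s[i] == t2: cnt += 1
--             c2[i] = cnt
--         cnt = 0
--         for i in range(len(s)):
--             if s[i] == t1: cnt += c2[i+1]
--         return cnt
--     if t1 != t2:
--         return count(text) + max(text.count(t1), text.count(t2))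
--     else:
--         count = text.count(t1) + 1
--         return count * (count - 1) >> 1
-- ===== SOURCE B (Python) =====
-- def maximumSubsequenceCount2(text: str, pattern: str) -> int:
--     t1, t2 = pattern
--     if t1 == t2:
--         c = text.count(t1) + 1
--         return c * (c - 1) >> 1
--     seen = 0
--     res = 0
--     for ch in text:
--         if ch == t1:
--             seen += 1
--         elif ch == t2:
--             res += seen
--     return res + max(text.count(t1), text.count(t2))
-- ===== Notes on version B (the rewrite author's own statement) =====
-- stated objective: simpler
-- what changed: Replaces the helper's two-pass scheme (a reversed pass building a suffix-count array c2, then a forward pass indexing into it) with a single forward pass keeping one running counter of t1's seen so far, added on each t2.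
import Mathlib
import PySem

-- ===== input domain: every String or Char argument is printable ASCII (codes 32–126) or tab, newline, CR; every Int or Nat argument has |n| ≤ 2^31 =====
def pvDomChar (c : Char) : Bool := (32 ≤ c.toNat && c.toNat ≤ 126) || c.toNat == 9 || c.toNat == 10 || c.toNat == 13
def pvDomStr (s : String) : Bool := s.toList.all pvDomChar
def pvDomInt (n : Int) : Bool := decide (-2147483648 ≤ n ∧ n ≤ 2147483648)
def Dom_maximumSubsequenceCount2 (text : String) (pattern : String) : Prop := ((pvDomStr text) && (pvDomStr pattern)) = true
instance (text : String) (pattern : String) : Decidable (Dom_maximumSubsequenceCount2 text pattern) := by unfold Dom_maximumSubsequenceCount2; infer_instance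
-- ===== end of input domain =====

-- B replaces A's helper's two passes (reversed suffix-count array build + forward indexed pass)
-- with a single forward pass keeping a running counter: simpler, O(1) extra space.

-- ===== PORT A =====
-- A's helper `count(s)`: a reversed pass filling the suffix-count array c2, then a forward
-- pass summing c2[i+1] on each t1.  Indices i are always in range, so `s[i]`/`c2[i]` are
-- ported with the total pyGetD/pySetD forms (exact under that in-range fact).
-- `text.count(t1)` has a one-character needle, so substring count = character count (exact).
def pvCountA (t1 t2 : Char) (cs : List Char) : Int :=
  let n := cs.length
  let st := (PySem.List.pyRange ((n : Int) - 1) (-1) (-1)).foldl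
    (fun (st : List Int × Int) i =>
      let cnt := if PySem.List.pyGetD cs i ' ' = t2 then st.2 + 1 else st.2
      (PySem.List.pySetD st.1 i cnt, cnt))
    (List.replicate (n + 1) (0 : Int), 0)
  (PySem.List.pyRange 0 (n : Int) 1).foldl
    (fun cnt i =>
      if PySem.List.pyGetD cs i ' ' = t1 then cnt + PySem.List.pyGetD st.1 (i + 1) 0 else cnt)
    0

def maximumSubsequenceCount2 (text : String) (pattern : String) : Int :=
  match pattern.toList with
  | [t1, t2] =>
    if t1 ≠ t2 then
      pvCountA t1 t2 text.toList +
        max ((text.toList.count t1 : Int)) ((text.toList.count t2 : Int))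
    else
      let count : Int := (text.toList.count t1 : Int) + 1
      (count * (count - 1)) >>> 1
  | _ => 0  -- unreachable under Pre_ (Python raises ValueError unpacking the pattern)

-- ===== PORT B =====
def maximumSubsequenceCount2_alt (text : String) (pattern : String) : Int :=
  if pattern.toList.length = 2 then
    let t1 := pattern.toList.getD 0 ' '
    let t2 := pattern.toList.getD 1 ' '
    if t1 = t2 then
      let c : Int := (text.toList.count t1 : Int) + 1
      (c * (c - 1)) >>> 1
    else
      let st := text.toList.foldl
        (fun (p : Int × Int) ch =>
          if ch = t1 then (p.1 + 1, p.2)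
          else if ch = t2 then (p.1, p.2 + p.1)
          else p)
        (0, 0)
      st.2 + max ((text.toList.count t1 : Int)) ((text.toList.count t2 : Int))
  else 0  -- unreachable under Pre_ (Python raises ValueError unpacking the pattern)

-- ===== PRECONDITION & SPEC =====
-- Pre_ excludes patterns whose length is not 2: there `t1, t2 = pattern` raises ValueError.
def Pre_maximumSubsequenceCount2 (text : String) (pattern : String) : Prop :=
  pattern.toList.length = 2
instance (text : String) (pattern : String) : Decidable (Pre_maximumSubsequenceCount2 text pattern) := by unfold Pre_maximumSubsequenceCount2; infer_instance

def pvWitness_maximumSubsequenceCount2 : String × String := ("abcab", "ab")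

def Spec_maximumSubsequenceCount2 (text : String) (pattern : String) (out : Int) : Prop := out = maximumSubsequenceCount2_alt text pattern
instance (text : String) (pattern : String) (out : Int) : Decidable (Spec_maximumSubsequenceCount2 text pattern out) := by unfold Spec_maximumSubsequenceCount2; infer_instance

-- ===== CLAIM (what is proved, stated in full; the proofs are below) =====
def Claim_equal_maximumSubsequenceCount2 : Prop := ∀ (text : String) (pattern : String), Dom_maximumSubsequenceCount2 text pattern → Pre_maximumSubsequenceCount2 text pattern → Spec_maximumSubsequenceCount2 text pattern (maximumSubsequenceCount2 text pattern)

-- ===== LEMMAS AND PROOFS =====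

-- the common value: sum over positions holding t1 of the number of t2's strictly after it
def pvF (t1 t2 : Char) : List Char → Int
  | [] => 0
  | c :: cs => (if c = t1 then (cs.count t2 : Int) else 0) + pvF t1 t2 cs

-- A's backward loop fills c2 with suffix counts of t2
theorem pvBackLoop (t1 t2 : Char) (cs : List Char) :
    ∀ (j : Nat) (c2 : List Int), j ≤ cs.length → c2.length = cs.length + 1 →
    let res := (PySem.List.pyRange ((j : Int) - 1) (-1) (-1)).foldl
      (fun (st : List Int × Int) i =>
        let cnt := if PySem.List.pyGetD cs i ' ' = t2 then st.2 + 1 else st.2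
        (PySem.List.pySetD st.1 i cnt, cnt))
      (c2, ((cs.drop j).count t2 : Int))
    res.1.length = cs.length + 1 ∧
      ∀ k : Nat, k ≤ cs.length →
        res.1.getD k 0 = if k < j then ((cs.drop k).count t2 : Int) else c2.getD k 0 := by
  intro j
  induction j with
  | zero =>
    intro c2 _ hlen
    rw [show ((0 : Nat) : Int) - 1 = -1 by norm_num,
        PySem.List.pyRange_neg_one_eq_nil le_rfl]
    exact ⟨hlen, fun k _ => by simp⟩
  | succ j ih =>
    intro c2 hj hlen
    have hjlt : j < cs.length := by omega
    have hget : PySem.List.pyGetD cs ((j : Nat) : Int) ' ' = cs[j] := by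
      simp [PySem.List.pyGetD_natCast, List.getD_eq_getElem?_getD, hjlt]
    have hdrop : cs.drop j = cs[j] :: cs.drop (j + 1) :=
      List.drop_eq_getElem_cons hjlt
    have hcnt : (if PySem.List.pyGetD cs ((j : Nat) : Int) ' ' = t2
        then ((cs.drop (j + 1)).count t2 : Int) + 1 else ((cs.drop (j + 1)).count t2 : Int))
        = ((cs.drop j).count t2 : Int) := by
      rw [hget, hdrop, List.count_cons]
      by_cases h : cs[j] = t2 <;> simp [h] <;> push_cast <;> ring
    have hset : PySem.List.pySetD c2 ((j : Nat) : Int) ((cs.drop j).count t2 : Int)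
        = c2.set j ((cs.drop j).count t2 : Int) := by
      simp [PySem.List.pySetD, PySem.List.pySet?, PySem.List.pyIdx?,
        show (0:Int) ≤ (j:Nat) by positivity, show ((j:Nat):Int) < c2.length by omega]
    have hih := ih (c2.set j ((cs.drop j).count t2 : Int)) (by omega) (by simp [hlen])
    simp only at hih
    rw [show ((j + 1 : Nat) : Int) - 1 = ((j : Nat) : Int) by push_cast; ring,
        PySem.List.pyRange_neg_one_cons (by omega : (-1 : Int) < ((j : Nat) : Int))]
    simp only [List.foldl_cons, hcnt, hset]
    refine ⟨hih.1, ?_⟩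
    intro k hk
    have h2 := hih.2 k hk
    by_cases hkj : k < j
    · rw [h2, if_pos hkj, if_pos (by omega : k < j + 1)]
    · by_cases hkj2 : k = j
      · subst hkj2
        rw [h2, if_neg hkj, if_pos (by omega : k < k + 1)]
        rw [List.getD_eq_getElem?_getD, List.getElem?_set_self (by omega)]
        simp
      · rw [h2, if_neg hkj, if_neg (by omega : ¬ k < j + 1)]
        rw [List.getD_eq_getElem?_getD, List.getElem?_set_ne (by omega),
          ← List.getD_eq_getElem?_getD]

-- A's forward loop sums the suffix counts found at t1-positions
theorem pvFwdLoop (t1 t2 : Char) (cs : List Char) (c2 : List Int)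
    (hc2 : ∀ k : Nat, k ≤ cs.length → c2.getD k 0 = ((cs.drop k).count t2 : Int)) :
    ∀ (m j : Nat) (acc : Int), j + m = cs.length →
    (PySem.List.pyRange ((j : Int)) (cs.length : Int) 1).foldl
      (fun cnt i =>
        if PySem.List.pyGetD cs i ' ' = t1 then cnt + PySem.List.pyGetD c2 (i + 1) 0 else cnt)
      acc = acc + pvF t1 t2 (cs.drop j) := by
  intro m
  induction m with
  | zero =>
    intro j acc hj
    rw [PySem.List.pyRange_one_eq_nil (by omega)]
    simp [List.drop_of_length_le (by omega : cs.length ≤ j), pvF]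
  | succ m ih =>
    intro j acc hj
    have hjlt : j < cs.length := by omega
    rw [PySem.List.pyRange_one_cons (by exact_mod_cast hjlt)]
    simp only [List.foldl_cons]
    have hget : PySem.List.pyGetD cs ((j : Nat) : Int) ' ' = cs[j] := by
      simp [PySem.List.pyGetD_natCast, List.getD_eq_getElem?_getD, hjlt]
    have hc2j : PySem.List.pyGetD c2 (((j : Nat) : Int) + 1) 0
        = ((cs.drop (j + 1)).count t2 : Int) := by
      rw [show ((j : Nat) : Int) + 1 = ((j + 1 : Nat) : Int) by push_cast; ring,
        PySem.List.pyGetD_natCast]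
      exact hc2 (j + 1) (by omega)
    have hdrop : cs.drop j = cs[j] :: cs.drop (j + 1) :=
      List.drop_eq_getElem_cons hjlt
    have := ih (j + 1) (if PySem.List.pyGetD cs ((j:Nat):Int) ' ' = t1
        then acc + PySem.List.pyGetD c2 (((j:Nat):Int) + 1) 0 else acc) (by omega)
    rw [show ((j + 1 : Nat) : Int) = ((j : Nat) : Int) + 1 by push_cast; ring] at this
    rw [this, hdrop]
    simp only [pvF, hget, hc2j]
    by_cases h : cs[j] = t1 <;> simp [h] <;> ring

theorem pvCountA_eq_pvF (t1 t2 : Char) (cs : List Char) :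
    pvCountA t1 t2 cs = pvF t1 t2 cs := by
  unfold pvCountA
  simp only []
  have hback := pvBackLoop t1 t2 cs cs.length (List.replicate (cs.length + 1) (0 : Int))
    le_rfl (by simp)
  simp only [List.drop_length, List.count_nil, Nat.cast_zero] at hback
  rw [show ((cs.length : Int) - 1) = ((cs.length : Nat) : Int) - 1 by norm_num] at *
  have hc2 : ∀ k : Nat, k ≤ cs.length →
      ((PySem.List.pyRange ((cs.length : Int) - 1) (-1) (-1)).foldl
        (fun (st : List Int × Int) i =>
          let cnt := if PySem.List.pyGetD cs i ' ' = t2 then st.2 + 1 else st.2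
          (PySem.List.pySetD st.1 i cnt, cnt))
        (List.replicate (cs.length + 1) (0 : Int), 0)).1.getD k 0
      = ((cs.drop k).count t2 : Int) := by
    intro k hk
    have h := hback.2 k hk
    by_cases hkl : k < cs.length
    · simpa [hkl] using h
    · have hk' : k = cs.length := by omega
      subst hk'
      simpa [show ¬ cs.length < cs.length by omega] using h
  have := pvFwdLoop t1 t2 cs _ hc2 cs.length 0 0 (by omega)
  simpa using this

-- B's single forward pass computes the same value
theorem pvBfold (t1 t2 : Char) (hne : t1 ≠ t2) (cs : List Char) :
    ∀ (s r : Int),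
    (cs.foldl (fun (p : Int × Int) ch =>
        if ch = t1 then (p.1 + 1, p.2)
        else if ch = t2 then (p.1, p.2 + p.1)
        else p) (s, r)).2 = r + s * (cs.count t2 : Int) + pvF t1 t2 cs := by
  induction cs with
  | nil => intro s r; simp [pvF]
  | cons c cs ih =>
    intro s r
    simp only [List.foldl_cons, pvF, List.count_cons]
    by_cases h1 : c = t1
    · subst h1
      simp only [if_pos rfl, ih]
      have : ¬ (c = t2) := hne
      simp [this]
      push_cast; ring
    · by_cases h2 : c = t2
      · subst h2
        simp only [if_neg h1, if_pos rfl, ih]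
        simp [h1]
        push_cast; ring
      · simp only [if_neg h1, if_neg h2, ih]
        simp [h1, h2]

-- ===== VERDICT (by name: the statement is the Claim_ definition above) =====
theorem maximumSubsequenceCount2_spec : Claim_equal_maximumSubsequenceCount2 := by
  intro text pattern _ hpre
  unfold Spec_maximumSubsequenceCount2
  unfold maximumSubsequenceCount2 maximumSubsequenceCount2_alt
  match hp : pattern.toList with
  | [t1, t2] =>
    simp only [List.length_cons, List.length_nil, if_pos rfl, List.getD_cons_zero,
      List.getD_cons_succ]
    by_cases h : t1 = t2
    · subst h; simp
    · rw [if_pos (show t1 ≠ t2 from h), if_neg h, pvCountA_eq_pvF,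
        pvBfold t1 t2 h text.toList 0 0]
      simp
  | [] => exact absurd hpre (by unfold Pre_maximumSubsequenceCount2; rw [hp]; simp)
  | [_] => exact absurd hpre (by unfold Pre_maximumSubsequenceCount2; rw [hp]; simp)
  | _ :: _ :: _ :: _ =>
    exact absurd hpre (by unfold Pre_maximumSubsequenceCount2; rw [hp]; simp)
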